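-- pv_equiv track=rewrite | github.com/db-tu-dresden/TSL | generator/utils/dict_utils.py | keep_in_list
-- ===== SOURCE A (Python) =====
-- import copy
--
-- def keep_in_list(alist: list, to_keep: list, in_place = True):
--     if in_place:
--         l = alist
--     else:
--         l = copy.deepcopy(alist)
--     idx_l = [idx for idx in range(len(l)) if l[idx] not in to_keep]
--     idx_l.sort(reverse=True)
--     for idx in idx_l:
--         l.pop(idx)
--
--     return l
-- ===== SOURCE B (Python) =====
-- import copy
--
-- def keep_in_list(alist: list, to_keep: list, in_place = True):
--     if in_place:
--         alist[:] = [x for x in alist if x in to_keep]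
--         return alist
--     return [x for x in copy.deepcopy(alist) if x in to_keep]
-- ===== Notes on version B (the rewrite author's own statement) =====
-- stated objective: simpler
-- what changed: Replaced A's collect-bad-indices / reverse-sort / repeated list.pop machinery with a single forward filtering pass (a list comprehension; slice-assigned back for in_place=True so the same object is mutated, filtered over a deepcopy for in_place=False).
import Mathlib
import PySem

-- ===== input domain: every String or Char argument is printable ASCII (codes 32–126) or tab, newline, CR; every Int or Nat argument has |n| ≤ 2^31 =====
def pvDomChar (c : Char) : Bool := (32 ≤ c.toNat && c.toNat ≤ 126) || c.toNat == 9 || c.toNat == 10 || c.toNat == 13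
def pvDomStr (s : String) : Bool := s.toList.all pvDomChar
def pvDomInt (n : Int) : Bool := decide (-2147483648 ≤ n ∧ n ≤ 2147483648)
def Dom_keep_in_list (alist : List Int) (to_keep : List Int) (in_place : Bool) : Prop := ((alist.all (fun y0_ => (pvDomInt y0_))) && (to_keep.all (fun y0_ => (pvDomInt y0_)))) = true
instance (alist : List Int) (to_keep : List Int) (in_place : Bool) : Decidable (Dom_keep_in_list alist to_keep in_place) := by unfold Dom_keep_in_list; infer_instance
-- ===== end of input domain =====

-- B replaces A's collect-indices / reverse-sort / pop-loop machinery with one forward filtering pass ("simpler").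
-- Equivalence is about the RETURN value; in Python, both A and B mutate alist identically when in_place=True.

-- ===== PORT A =====
-- one step of the loop 'for idx in idx_l: l.pop(idx)' (pop? is never none here: every idx is in range)
def pvPopStep (l : List Int) (idx : Int) : List Int :=
  match PySem.List.pop? l idx with
  | some (_, r) => r
  | none => l

def keep_in_list (alist : List Int) (to_keep : List Int) (in_place : Bool) : List Int :=
  -- copy.deepcopy on a list of ints is value-identity, so both branches bind l to the same value
  let l := if in_place then alist else alist
  let idx_l := (PySem.List.pyRange 0 (PySem.List.len l) 1).filter
      (fun idx => !(decide (PySem.List.pyGetD l idx 0 ∈ to_keep)))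
  let idx_l := PySem.List.sorted idx_l (fun x => x) true
  idx_l.foldl pvPopStep l

-- ===== PORT B =====
def keep_in_list_alt (alist : List Int) (to_keep : List Int) (in_place : Bool) : List Int :=
  if in_place then
    alist.filter (fun x => decide (x ∈ to_keep))
  else
    -- copy.deepcopy of a list of ints is value-identity
    alist.filter (fun x => decide (x ∈ to_keep))

-- ===== PRECONDITION & SPEC =====
def Spec_keep_in_list (alist : List Int) (to_keep : List Int) (in_place : Bool) (out : List Int) : Prop := out = keep_in_list_alt alist to_keep in_place
instance (alist : List Int) (to_keep : List Int) (in_place : Bool) (out : List Int) : Decidable (Spec_keep_in_list alist to_keep in_place out) := by unfold Spec_keep_in_list; infer_instance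

-- ===== CLAIM (what is proved, stated in full; the proofs are below) =====
def Claim_equal_keep_in_list : Prop := ∀ (alist : List Int) (to_keep : List Int) (in_place : Bool), Dom_keep_in_list alist to_keep in_place → Spec_keep_in_list alist to_keep in_place (keep_in_list alist to_keep in_place)

-- ===== LEMMAS AND PROOFS =====

-- A's pop loop: popping an increasing list of indices back-to-front from xs ++ t, where the
-- indices are exactly the positions of xs whose element fails p, leaves xs.filter p ++ t.
lemma pop_loop_filter (p : Int → Bool) (xs : List Int) : ∀ t : List Int,
    (((List.range xs.length).filter (fun i => !p (xs.getD i 0))).reverse).foldl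
      (fun l (i : Nat) => pvPopStep l (i:Int)) (xs ++ t) = xs.filter p ++ t := by
  induction xs using List.reverseRecOn with
  | nil => intro t; simp
  | append_singleton xs x ih =>
    intro t
    have hfc : (List.range xs.length).filter (fun i => !p ((xs ++ [x]).getD i 0))
             = (List.range xs.length).filter (fun i => !p (xs.getD i 0)) := by
      apply List.filter_congr; intro i hi
      rw [List.getD_append _ _ _ _ (List.mem_range.mp hi)]
    have hgx : (xs ++ [x]).getD xs.length 0 = x := by simp [List.getD]
    have hassoc : xs ++ [x] ++ t = xs ++ (x :: t) := by simp
    rw [List.length_append, List.length_singleton, List.range_succ, List.filter_append,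
        hfc, List.filter_cons, List.filter_nil, hgx, hassoc]
    cases hp : p x with
    | true =>
      have := ih (x :: t)
      simp only [hp, Bool.not_true, Bool.false_eq_true, if_false, List.append_nil,
        List.filter_append, List.filter_cons, if_true, List.filter_nil] at this ⊢
      simpa using this
    | false =>
      have hpop : pvPopStep (xs ++ (x :: t)) (xs.length : Int) = xs ++ t := by
        have h : xs.length < (xs ++ (x :: t)).length := by simp
        simp [pvPopStep, PySem.List.pop?_natCast _ _ h,
          List.eraseIdx_append_of_length_le (le_refl _)]
      simp only [hp, Bool.not_false, if_true, List.reverse_append, List.reverse_cons,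
        List.reverse_nil, List.nil_append, List.filter_append,
        List.filter_cons, Bool.false_eq_true, if_false, List.filter_nil, List.append_nil]
      rw [List.singleton_append, List.foldl_cons, hpop]
      exact ih t

-- A computes the membership filter of alist.
theorem keep_in_list_eq_filter (alist to_keep : List Int) (ip : Bool) :
    keep_in_list alist to_keep ip = alist.filter (fun x => decide (x ∈ to_keep)) := by
  show (PySem.List.sorted
      ((PySem.List.pyRange 0 (PySem.List.len (if ip then alist else alist)) 1).filter
        (fun idx => !(decide (PySem.List.pyGetD (if ip then alist else alist) idx 0 ∈ to_keep))))
      (fun x => x) true).foldl pvPopStep (if ip then alist else alist) = _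
  rw [ite_self]
  rw [show PySem.List.len alist = (alist.length : Int) from PySem.List.len_eq alist]
  rw [PySem.List.pyRange_zero_natCast]
  rw [List.filter_map]
  have hsort : PySem.List.sorted
      (((List.range alist.length).filter
        ((fun idx => !(decide (PySem.List.pyGetD alist idx 0 ∈ to_keep))) ∘ (fun (k:Nat) => (k:Int)))).map
        (fun (k:Nat) => (k:Int))) (fun x => x) true
      = (((List.range alist.length).filter
        ((fun idx => !(decide (PySem.List.pyGetD alist idx 0 ∈ to_keep))) ∘ (fun (k:Nat) => (k:Int)))).reverse).map
        (fun (k:Nat) => (k:Int)) := by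
    apply PySem.List.sorted_rev_eq_of_perm_of_pairwise_gt
    · exact (List.reverse_perm _).map _
    · rw [List.pairwise_map, List.pairwise_reverse]
      refine List.Pairwise.filter _ ?_
      refine (List.pairwise_lt_range).imp ?_
      intro a b h; exact_mod_cast h
  rw [hsort, List.foldl_map]
  have hmain := pop_loop_filter (fun x => decide (x ∈ to_keep)) alist []
  rw [List.append_nil, List.append_nil] at hmain
  rw [← hmain]
  congr 1
  congr 1
  apply List.filter_congr
  intro i hi
  simp [Function.comp]

-- ===== VERDICT (by name: the statement is the Claim_ definition above) =====
theorem keep_in_list_spec : Claim_equal_keep_in_list := by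
  intro alist to_keep in_place _
  unfold Spec_keep_in_list keep_in_list_alt
  cases in_place <;> [skip; skip] <;> exact keep_in_list_eq_filter alist to_keep _
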